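-- pv_equiv track=rewrite | github.com/skybluesharkk/shim | pnu/2_2/자료구조/LAB03_카드셔플.py | cardshuffle
-- ===== SOURCE A (Python) =====
-- def cardshuffle(list):
--     n = len(list)
--     _result = []
--     if n%2==0:
--         n2 = int(n)/2
--         l1 = list[0:int(n2)]
--         l2 = list[int(n2):n]
--         for i in range(int(n2)):
--             _result.append(l1[i])
--             _result.append(l2[i])
--     else:
--         n2 = int(n//2)
--         l1 = list[0:n2+1]
--         l2 = list[n2+1:n]
--         for i in range(int(n2)):
--             _result.append(l1[i])
--             _result.append(l2[i])
--         _result.append(l1[n2])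
--     return _result
-- ===== SOURCE B (Python) =====
-- def cardshuffle(list):
--     n = len(list)
--     mid = (n + 1) // 2
--     result = []
--     for j in range(n):
--         if j % 2 == 0:
--             result.append(list[j // 2])
--         else:
--             result.append(list[mid + j // 2])
--     return result
-- ===== Notes on version B (the rewrite author's own statement) =====
-- stated objective: simpler
-- what changed: Instead of slicing the list into two halves (with separate even/odd branches and a leftover append), B computes each output position directly in one uniform loop: position j takes list[j//2] when j is even and list[mid + j//2] when j is odd, with mid = (n+1)//2.
import Mathlib
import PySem

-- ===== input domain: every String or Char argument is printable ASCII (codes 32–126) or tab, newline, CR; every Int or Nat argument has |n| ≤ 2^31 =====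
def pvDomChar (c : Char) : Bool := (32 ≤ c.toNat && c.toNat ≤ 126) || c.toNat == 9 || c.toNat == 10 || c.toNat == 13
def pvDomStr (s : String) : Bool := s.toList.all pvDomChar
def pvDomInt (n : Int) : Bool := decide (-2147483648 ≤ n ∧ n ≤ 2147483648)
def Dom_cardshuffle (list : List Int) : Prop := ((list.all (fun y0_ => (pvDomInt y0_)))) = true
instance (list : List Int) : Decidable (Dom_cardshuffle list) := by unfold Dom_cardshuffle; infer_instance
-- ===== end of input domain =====

-- B replaces A's two-halves slicing with even/odd leftover branches by one uniform
-- indexing loop over output positions (simpler decomposition, same O(n) cost).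


-- ===== PORT A =====
-- Literal port of A. 'int(n)/2' is Python float division, taken only when n is even,
-- so 'int(n2)' is exactly n // 2 = floordiv n 2. The indexings l1[i], l2[i], l1[n2]
-- are always in range (i < n2 ≤ len), so pyGetD with default 0 is exact here.
def cardshuffle (list : List Int) : List Int :=
  let n : Int := list.length
  if PySem.Int.mod n 2 == 0 then
    let n2 : Int := PySem.Int.floordiv n 2
    let l1 := PySem.List.slice list (some 0) (some n2)
    let l2 := PySem.List.slice list (some n2) (some n)
    (PySem.List.pyRange 0 n2 1).foldl
      (fun acc i => (acc ++ [PySem.List.pyGetD l1 i 0]) ++ [PySem.List.pyGetD l2 i 0]) []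
  else
    let n2 : Int := PySem.Int.floordiv n 2
    let l1 := PySem.List.slice list (some 0) (some (n2 + 1))
    let l2 := PySem.List.slice list (some (n2 + 1)) (some n)
    ((PySem.List.pyRange 0 n2 1).foldl
      (fun acc i => (acc ++ [PySem.List.pyGetD l1 i 0]) ++ [PySem.List.pyGetD l2 i 0]) [])
      ++ [PySem.List.pyGetD l1 n2 0]

-- ===== PORT B =====
-- Literal port of Source B. The indexings list[j//2] and list[mid + j//2]
-- are always in range for j in range(n), so pyGetD with default 0 is exact here.
def cardshuffle_alt (list : List Int) : List Int :=
  let n : Int := list.length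
  let mid : Int := PySem.Int.floordiv (n + 1) 2
  (PySem.List.pyRange 0 n 1).foldl
    (fun acc j =>
      if PySem.Int.mod j 2 == 0 then
        acc ++ [PySem.List.pyGetD list (PySem.Int.floordiv j 2) 0]
      else
        acc ++ [PySem.List.pyGetD list (mid + PySem.Int.floordiv j 2) 0]) []

-- ===== PRECONDITION & SPEC =====
def Spec_cardshuffle (list : List Int) (out : List Int) : Prop := out = cardshuffle_alt list
instance (list : List Int) (out : List Int) : Decidable (Spec_cardshuffle list out) := by unfold Spec_cardshuffle; infer_instance

-- ===== CLAIM (what is proved, stated in full; the proofs are below) =====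
def Claim_equal_cardshuffle : Prop := ∀ (list : List Int), Dom_cardshuffle list → Spec_cardshuffle list (cardshuffle list)

-- ===== LEMMAS AND PROOFS =====

-- Riffle interleave, taking alternately from the two lists (first list first).
def ilv : List Int → List Int → List Int
  | [], b => b
  | x :: a, b => x :: ilv b a
termination_by a b => a.length + b.length
decreasing_by simp; omega

theorem ilv_nil (b : List Int) : ilv [] b = b := by simp [ilv]
theorem ilv_cons (x : Int) (a b : List Int) : ilv (x :: a) b = x :: ilv b a := by simp [ilv]

theorem mod_two_natCast (m : Nat) : PySem.Int.mod (m : Int) 2 = ((m % 2 : Nat) : Int) := by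
  exact_mod_cast PySem.Int.mod_natCast m 2

theorem floordiv_two_natCast (m : Nat) : PySem.Int.floordiv (m : Int) 2 = ((m / 2 : Nat) : Int) := by
  exact_mod_cast PySem.Int.floordiv_natCast m 2

-- Interleaving halves with equal lengths, read off by index pairs.
theorem flatMap_range_ilv : ∀ (l1 l2 : List Int), l1.length = l2.length →
    (List.range l1.length).flatMap (fun i => [l1.getD i 0, l2.getD i 0]) = ilv l1 l2 := by
  intro l1
  induction l1 with
  | nil => intro l2 h; cases l2 <;> simp_all [ilv_nil]
  | cons x a ih =>
    intro l2 h
    cases l2 with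
    | nil => simp at h
    | cons y b =>
      simp only [List.length_cons, List.range_succ_eq_map, List.flatMap_cons,
        List.flatMap_map]
      have : (List.range a.length).flatMap
          (fun i => [(x :: a).getD (Nat.succ i) 0, (y :: b).getD (Nat.succ i) 0])
          = (List.range a.length).flatMap (fun i => [a.getD i 0, b.getD i 0]) := by
        apply List.flatMap_congr
        intro i _
        simp [List.getD_cons_succ]
      rw [this, ih b (by simpa using h)]
      simp [ilv_cons]

-- The uniform index map equals interleaving, when the first list is the (weakly) longer one.
theorem map_range_ilv : ∀ (a b : List Int), b.length ≤ a.length → a.length ≤ b.length + 1 →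
    (List.range (a.length + b.length)).map
      (fun j => if j % 2 = 0 then a.getD (j / 2) 0 else b.getD (j / 2) 0) = ilv a b := by
  intro a
  induction a with
  | nil =>
    intro b h1 _
    have hb : b = [] := List.length_eq_zero_iff.mp (by simpa using h1)
    subst hb
    simp [ilv_nil]
  | cons x a' ih =>
    intro b h1 h2
    cases b with
    | nil =>
      have ha' : a' = [] := by
        cases a' with
        | nil => rfl
        | cons y t => exfalso; simp at h2
      subst ha'
      simp [ilv_cons, ilv_nil]
    | cons v b' =>
      have hlen : (x :: a').length + (v :: b').length = (a'.length + b'.length) + 1 + 1 := by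
        simp; omega
      rw [hlen, List.range_succ_eq_map, List.range_succ_eq_map]
      simp only [List.map_cons, List.map_map]
      have heq : (List.range (a'.length + b'.length)).map
          ((fun j => if j % 2 = 0 then (x :: a').getD (j / 2) 0 else (v :: b').getD (j / 2) 0)
            ∘ Nat.succ ∘ Nat.succ)
          = (List.range (a'.length + b'.length)).map
            (fun j => if j % 2 = 0 then a'.getD (j / 2) 0 else b'.getD (j / 2) 0) := by
        apply List.map_congr_left
        intro j _
        by_cases hj : j % 2 = 0
        · have e1 : (j + 1 + 1) % 2 = 0 := by omega
          have e2 : (j + 1 + 1) / 2 = j / 2 + 1 := by omega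
          simp [Function.comp, Nat.succ_eq_add_one, hj, e1, e2]
        · have e1 : (j + 1 + 1) % 2 ≠ 0 := by omega
          have e2 : (j + 1 + 1) / 2 = j / 2 + 1 := by omega
          simp only [Function.comp, Nat.succ_eq_add_one, e2, List.getD_cons_succ]
          rw [if_neg hj, if_neg e1]
      rw [heq, ih b' (by simp at h1 ⊢; omega) (by simp at h2 ⊢; omega)]
      simp [ilv_cons]

-- Appending the leftover element of the longer half.
theorem ilv_append_singleton : ∀ (a b : List Int) (x : Int), a.length = b.length →
    ilv (a ++ [x]) b = ilv a b ++ [x] := by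
  intro a
  induction a with
  | nil => intro b x h; cases b <;> simp_all [ilv_nil, ilv_cons]
  | cons u a' ih =>
    intro b x h
    cases b with
    | nil => simp at h
    | cons v b' =>
      simp only [List.cons_append, ilv_cons]
      rw [ih b' x (by simpa using h)]

-- A's value: interleave of the two halves cut at mid = (n+1)/2 (Nat arithmetic).
theorem cardshuffle_eq_ilv (list : List Int) :
    cardshuffle list = ilv (list.take ((list.length + 1) / 2)) (list.drop ((list.length + 1) / 2)) := by
  unfold cardshuffle
  simp only []
  by_cases hpar : list.length % 2 = 0
  · have hcond : PySem.Int.mod (list.length : Int) 2 == 0 := by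
      rw [mod_two_natCast]
      simp only [beq_iff_eq, Nat.cast_eq_zero, hpar]
    rw [if_pos hcond]
    set n := list.length with hn
    have hfd : PySem.Int.floordiv (n : Int) 2 = ((n / 2 : Nat) : Int) :=
      floordiv_two_natCast n
    have hmid : (n + 1) / 2 = n / 2 := by omega
    rw [hfd]
    have hl1 : PySem.List.slice list (some ((0 : Nat) : Int)) (some ((n / 2 : Nat) : Int))
        = (list.drop 0).take (n / 2 - 0) := PySem.List.slice_natCast list 0 (n / 2)
    have hl2 : PySem.List.slice list (some ((n / 2 : Nat) : Int)) (some ((n : Nat) : Int))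
        = (list.drop (n / 2)).take (n - n / 2) := PySem.List.slice_natCast list (n / 2) n
    simp only [Nat.cast_zero] at hl1
    rw [hl1, hl2]
    set l1 := (list.drop 0).take (n / 2 - 0) with hl1d
    set l2 := (list.drop (n / 2)).take (n - n / 2) with hl2d
    have hlen1 : l1.length = n / 2 := by simp [hl1d, hn]; omega
    have hlen2 : l2.length = n / 2 := by simp [hl2d, hn]; omega
    rw [PySem.List.pyRange_zero_natCast (n / 2), List.foldl_map]
    simp only [PySem.List.pyGetD_natCast]
    have hbody : ∀ (acc : List Int) (i : Nat),
        (acc ++ [l1.getD i 0]) ++ [l2.getD i 0] = acc ++ [l1.getD i 0, l2.getD i 0] := by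
      intro acc i; simp
    simp only [hbody]
    rw [PySem.List.foldl_append_eq_flatMap (fun i => [l1.getD i 0, l2.getD i 0]) (List.range (n / 2)) []]
    simp only [List.nil_append]
    have hfl : (List.range (n / 2)).flatMap (fun i => [l1.getD i 0, l2.getD i 0]) = ilv l1 l2 := by
      have h := flatMap_range_ilv l1 l2 (by rw [hlen1, hlen2])
      rwa [hlen1] at h
    rw [hfl]
    have e1 : l1 = list.take ((n + 1) / 2) := by
      simp [hl1d, hmid]
    have e2 : l2 = list.drop ((n + 1) / 2) := by
      rw [hl2d, hmid]
      have : (list.drop (n / 2)).length = n - n / 2 := by simp [hn]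
      rw [← this, List.take_length]
    rw [e1, e2]
  · have hcond : ¬ (PySem.Int.mod (list.length : Int) 2 == 0) := by
      rw [mod_two_natCast]
      simp only [beq_iff_eq, Nat.cast_eq_zero]
      exact hpar
    rw [if_neg hcond]
    set n := list.length with hn
    have hfd : PySem.Int.floordiv (n : Int) 2 = ((n / 2 : Nat) : Int) :=
      floordiv_two_natCast n
    have hmid : (n + 1) / 2 = n / 2 + 1 := by omega
    rw [hfd]
    have hc1 : ((n / 2 : Nat) : Int) + 1 = ((n / 2 + 1 : Nat) : Int) := by push_cast; ring
    rw [hc1]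
    have hl1 : PySem.List.slice list (some ((0 : Nat) : Int)) (some ((n / 2 + 1 : Nat) : Int))
        = (list.drop 0).take (n / 2 + 1 - 0) := PySem.List.slice_natCast list 0 (n / 2 + 1)
    have hl2 : PySem.List.slice list (some ((n / 2 + 1 : Nat) : Int)) (some ((n : Nat) : Int))
        = (list.drop (n / 2 + 1)).take (n - (n / 2 + 1)) := PySem.List.slice_natCast list (n / 2 + 1) n
    simp only [Nat.cast_zero] at hl1
    rw [hl1, hl2]
    set l1 := (list.drop 0).take (n / 2 + 1 - 0) with hl1d
    set l2 := (list.drop (n / 2 + 1)).take (n - (n / 2 + 1)) with hl2d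
    have hne : list ≠ [] := by
      intro hnil; rw [hnil] at hn; simp [hn] at hpar
    have hlt : n / 2 < n := by
      have : 0 < n := by
        cases list with
        | nil => exact absurd rfl hne
        | cons _ _ => simp [hn]
      omega
    have hlen1 : l1.length = n / 2 + 1 := by simp [hl1d, hn]; omega
    have hlen2 : l2.length = n / 2 := by simp [hl2d, hn]; omega
    rw [PySem.List.pyRange_zero_natCast (n / 2), List.foldl_map]
    simp only [PySem.List.pyGetD_natCast]
    have hbody : ∀ (acc : List Int) (i : Nat),
        (acc ++ [l1.getD i 0]) ++ [l2.getD i 0] = acc ++ [l1.getD i 0, l2.getD i 0] := by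
      intro acc i; simp
    simp only [hbody]
    rw [PySem.List.foldl_append_eq_flatMap (fun i => [l1.getD i 0, l2.getD i 0]) (List.range (n / 2)) []]
    simp only [List.nil_append]
    -- split l1 into its first n/2 elements and its last element
    have hsplit : l1 = l1.take (n / 2) ++ [l1.getD (n / 2) 0] := by
      have hlt1 : n / 2 < l1.length := by omega
      conv_lhs => rw [← List.take_of_length_le (le_of_eq hlen1), List.take_add_one]
      rw [List.getElem?_eq_getElem hlt1, List.getD_eq_getElem l1 0 hlt1]
      rfl
    have hflat : (List.range (n / 2)).flatMap (fun i => [l1.getD i 0, l2.getD i 0])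
        = (List.range (n / 2)).flatMap (fun i => [(l1.take (n / 2)).getD i 0, l2.getD i 0]) := by
      apply List.flatMap_congr
      intro i hi
      simp only [List.mem_range] at hi
      rw [List.getD_eq_getElem l1 0 (by omega), List.getD_eq_getElem (l1.take (n / 2)) 0 (by simp [hlen1]; omega)]
      simp [List.getElem_take]
    rw [hflat]
    have hlen1' : (l1.take (n / 2)).length = n / 2 := by simp [hlen1]
    have hfl : (List.range (n / 2)).flatMap (fun i => [(l1.take (n / 2)).getD i 0, l2.getD i 0])
        = ilv (l1.take (n / 2)) l2 := by
      have h := flatMap_range_ilv (l1.take (n / 2)) l2 (by rw [hlen1', hlen2])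
      rwa [hlen1'] at h
    rw [hfl]
    rw [← ilv_append_singleton _ _ _ (by rw [hlen1', hlen2]), ← hsplit]
    have e1 : l1 = list.take ((n + 1) / 2) := by simp [hl1d, hmid]
    have e2 : l2 = list.drop ((n + 1) / 2) := by
      rw [hl2d, hmid]
      have : (list.drop (n / 2 + 1)).length = n - (n / 2 + 1) := by simp [hn]
      rw [← this, List.take_length]
    rw [e1, e2]

-- B's value: the same interleave of the two halves.
theorem cardshuffle_alt_eq_ilv (list : List Int) :
    cardshuffle_alt list = ilv (list.take ((list.length + 1) / 2)) (list.drop ((list.length + 1) / 2)) := by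
  unfold cardshuffle_alt
  simp only []
  set n := list.length with hn
  set mid := (n + 1) / 2 with hmid
  have hfd : PySem.Int.floordiv ((n : Int) + 1) 2 = ((mid : Nat) : Int) := by
    have h : ((n : Int) + 1) = ((n + 1 : Nat) : Int) := by push_cast; ring
    rw [h, floordiv_two_natCast]
  rw [hfd, PySem.List.pyRange_zero_natCast n, List.foldl_map]
  have hbody : ∀ (acc : List Int) (j : Nat),
      (if PySem.Int.mod (j : Int) 2 == 0 then
          acc ++ [PySem.List.pyGetD list (PySem.Int.floordiv (j : Int) 2) 0]
        else
          acc ++ [PySem.List.pyGetD list (((mid : Nat) : Int) + PySem.Int.floordiv (j : Int) 2) 0])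
      = acc ++ [if j % 2 = 0 then list.getD (j / 2) 0 else list.getD (mid + j / 2) 0] := by
    intro acc j
    have hm : PySem.Int.mod (j : Int) 2 = ((j % 2 : Nat) : Int) := mod_two_natCast j
    have hd : PySem.Int.floordiv (j : Int) 2 = ((j / 2 : Nat) : Int) := floordiv_two_natCast j
    have hc : ((mid : Nat) : Int) + ((j / 2 : Nat) : Int) = ((mid + j / 2 : Nat) : Int) := by push_cast; ring
    rw [hm, hd, hc]
    split
    · next hcnd =>
        have hj : j % 2 = 0 := by
          simp only [beq_iff_eq, Nat.cast_eq_zero] at hcnd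
          exact hcnd
        rw [if_pos hj, PySem.List.pyGetD_natCast]
    · next hcnd =>
        have hj : ¬ j % 2 = 0 := by
          simp only [beq_iff_eq, Nat.cast_eq_zero] at hcnd
          exact hcnd
        rw [if_neg hj, PySem.List.pyGetD_natCast]
  simp only [hbody]
  rw [PySem.List.foldl_append_singleton_eq_map
    (fun j => if j % 2 = 0 then list.getD (j / 2) 0 else list.getD (mid + j / 2) 0) (List.range n) []]
  simp only [List.nil_append]
  have hmle : mid ≤ n := by omega
  set a := list.take mid with ha
  set b := list.drop mid with hb
  have hlena : a.length = mid := by simp [ha]; omega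
  have hlenb : b.length = n - mid := by simp [hb, hn]
  have hsum : a.length + b.length = n := by omega
  have hcongr : (List.range n).map
      (fun j => if j % 2 = 0 then list.getD (j / 2) 0 else list.getD (mid + j / 2) 0)
      = (List.range n).map
      (fun j => if j % 2 = 0 then a.getD (j / 2) 0 else b.getD (j / 2) 0) := by
    apply List.map_congr_left
    intro j hj
    simp only [List.mem_range] at hj
    by_cases hjp : j % 2 = 0
    · have hhalf : j / 2 < mid := by omega
      rw [if_pos hjp, if_pos hjp, List.getD_eq_getElem list 0 (by omega),
        List.getD_eq_getElem a 0 (by omega)]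
      simp [ha, List.getElem_take]
    · have hhalf : j / 2 < n - mid := by omega
      rw [if_neg hjp, if_neg hjp, List.getD_eq_getElem list 0 (by omega),
        List.getD_eq_getElem b 0 (by omega)]
      simp [hb, List.getElem_drop]
  rw [hcongr, ← hsum, map_range_ilv a b (by omega) (by omega)]

-- ===== VERDICT (by name: the statement is the Claim_ definition above) =====
theorem cardshuffle_spec : Claim_equal_cardshuffle := by
  intro list _
  unfold Spec_cardshuffle
  rw [cardshuffle_eq_ilv, cardshuffle_alt_eq_ilv]
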